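-- pv_equiv track=rewrite | github.com/zhangrong1722/interview | code/at_offer/string/coding_interview46.py | GetTranslationCount_DPSolution
-- ===== SOURCE A (Python) =====
-- def GetTranslationCount_DPSolution(number):
--     if number is None or number < 0:
--         return 0
--     number = list(str(number))
--     # 只有一个元素时
--     if len(number) == 1:
--         return 1
--     dp = [1] * (len(number))
--     # 只有两个元素
--     if len(number) == 2:
--         if 0 <= int(number[-2] + number[-1]) <= 25:
--             return 2
--         return 1
--     # 有两个元素及以上
--     if 0 <= int(number[-2] + number[-1]) <= 25:
--         dp[-2] = 2
--
--     for i in range(len(number) - 3, -1, -1):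
--         if i + 1 < len(number):
--             dp[i] = dp[i + 1]
--         if i + 2 < len(number) and 0 <= int(number[i] + number[i + 1]) <= 25:
--             dp[i] += dp[i + 2]
--     return dp[0]
-- ===== SOURCE B (Python) =====
-- def GetTranslationCount_DPSolution(number):
--     if number is None or number < 0:
--         return 0
--
--     def ways(ds):
--         # number of translations of the digit list ds (direct recursion on the structure)
--         if len(ds) <= 1:
--             return 1
--         r = ways(ds[1:])
--         if 0 <= int(ds[0] + ds[1]) <= 25:
--             r += ways(ds[2:])
--         return r
--
--     return ways(list(str(number)))
-- ===== Notes on version B (the rewrite author's own statement) =====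
-- stated objective: simpler
-- what changed: Replaces A's backward-filled dp array (preseeded tail entries plus an index loop from len-3 down to 0) with a direct structural recursion on the digit list: ways(ds) = ways(ds[1:]) plus ways(ds[2:]) when the leading two characters parse to a translatable pair, keeping the same guards (negative -> 0, single digit -> 1) and the exact leading-zero pairing test.
import Mathlib
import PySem

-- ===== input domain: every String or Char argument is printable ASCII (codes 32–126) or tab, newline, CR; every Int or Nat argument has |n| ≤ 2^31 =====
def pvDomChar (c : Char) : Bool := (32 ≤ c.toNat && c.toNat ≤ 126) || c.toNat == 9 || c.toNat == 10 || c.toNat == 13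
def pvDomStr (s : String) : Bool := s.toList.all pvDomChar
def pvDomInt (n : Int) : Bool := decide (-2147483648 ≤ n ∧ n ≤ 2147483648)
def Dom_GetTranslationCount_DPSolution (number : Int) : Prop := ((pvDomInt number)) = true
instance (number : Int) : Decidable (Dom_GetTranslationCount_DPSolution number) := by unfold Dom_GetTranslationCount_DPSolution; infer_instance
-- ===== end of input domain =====

-- B replaces A's backward-filled dp array with a direct structural recursion on the digit list: a different, simpler decomposition of the same count.


-- int(c1 + c2): both Pythons concatenate two digit characters of str(number) and parse the result;
-- on the digits of str(number) the parse always succeeds, so the .getD 0 default is never used.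
def pvPairInt (a b : Char) : Int := (PySem.Int.ofChars? [a, b]).getD 0

-- ===== PORT A =====
-- body of A's backward for-loop: dp[i] = dp[i+1]; then dp[i] += dp[i+2] if 0 <= int(number[i]+number[i+1]) <= 25
def pvStepA (ds : List Char) (dp : List Int) (i : Int) : List Int :=
  let dp := if i + 1 < (ds.length : Int) then
      PySem.List.pySetD dp i (PySem.List.pyGetD dp (i + 1) 0)
    else dp
  if i + 2 < (ds.length : Int) ∧
     0 ≤ pvPairInt (PySem.List.pyGetD ds i ' ') (PySem.List.pyGetD ds (i + 1) ' ') ∧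
     pvPairInt (PySem.List.pyGetD ds i ' ') (PySem.List.pyGetD ds (i + 1) ' ') ≤ 25 then
    PySem.List.pySetD dp i (PySem.List.pyGetD dp i 0 + PySem.List.pyGetD dp (i + 2) 0)
  else dp

-- ('number is None' cannot arise for an Int argument; the in-range index reads/writes use the total pyGetD/pySetD forms)
def GetTranslationCount_DPSolution (number : Int) : Int :=
  if number < 0 then 0
  else
    let ds := PySem.Int.toChars number
    if ds.length = 1 then 1
    else
      let dp : List Int := List.replicate ds.length 1
      let last2 := pvPairInt (PySem.List.pyGetD ds (-2) ' ') (PySem.List.pyGetD ds (-1) ' ')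
      if ds.length = 2 then
        if 0 ≤ last2 ∧ last2 ≤ 25 then 2 else 1
      else
        let dp := if 0 ≤ last2 ∧ last2 ≤ 25 then PySem.List.pySetD dp (-2) 2 else dp
        let dp := (PySem.List.pyRange ((ds.length : Int) - 3) (-1) (-1)).foldl (pvStepA ds) dp
        PySem.List.pyGetD dp 0 0

-- ===== PORT B =====
-- ways(ds): recursion on the digit list; take one digit, plus take two when int(ds[0]+ds[1]) is in [0,25]
def pvWays : List Char → Int
  | [] => 1
  | [_] => 1
  | a :: b :: t =>
      pvWays (b :: t) + (if 0 ≤ pvPairInt a b ∧ pvPairInt a b ≤ 25 then pvWays t else 0)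

def GetTranslationCount_DPSolution_alt (number : Int) : Int :=
  if number < 0 then 0
  else pvWays (PySem.Int.toChars number)

-- ===== PRECONDITION & SPEC =====
def Spec_GetTranslationCount_DPSolution (number : Int) (out : Int) : Prop := out = GetTranslationCount_DPSolution_alt number
instance (number : Int) (out : Int) : Decidable (Spec_GetTranslationCount_DPSolution number out) := by unfold Spec_GetTranslationCount_DPSolution; infer_instance

-- ===== CLAIM (what is proved, stated in full; the proofs are below) =====
def Claim_equal_GetTranslationCount_DPSolution : Prop := ∀ (number : Int), Dom_GetTranslationCount_DPSolution number → Spec_GetTranslationCount_DPSolution number (GetTranslationCount_DPSolution number)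

-- ===== LEMMAS AND PROOFS =====

-- loop invariant of A's backward pass: dp already holds pvWays (ds.drop j) at every position j ≥ m
def pvGood (ds : List Char) (m : Nat) (dp : List Int) : Prop :=
  dp.length = ds.length ∧
  ∀ j : Nat, m ≤ j → j < ds.length →
    PySem.List.pyGetD dp (j : Int) 0 = pvWays (ds.drop j)

theorem pvWays_drop (ds : List Char) (k : Nat) (hk : k + 1 < ds.length) :
    pvWays (ds.drop k) =
      pvWays (ds.drop (k + 1)) +
        (if 0 ≤ pvPairInt (PySem.List.pyGetD ds (k : Int) ' ') (PySem.List.pyGetD ds ((k : Int) + 1) ' ') ∧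
            pvPairInt (PySem.List.pyGetD ds (k : Int) ' ') (PySem.List.pyGetD ds ((k : Int) + 1) ' ') ≤ 25
         then pvWays (ds.drop (k + 2)) else 0) := by
  have h0 : k < ds.length := by omega
  have e1 : ds.drop k = ds[k] :: ds.drop (k + 1) := List.drop_eq_getElem_cons h0
  have e2 : ds.drop (k + 1) = ds[k + 1] :: ds.drop (k + 2) := List.drop_eq_getElem_cons hk
  have g1 : PySem.List.pyGetD ds (k : Int) ' ' = ds[k] := by
    rw [PySem.List.pyGetD_natCast]; exact List.getD_eq_getElem ds ' ' h0
  have g2 : PySem.List.pyGetD ds ((k : Int) + 1) ' ' = ds[k + 1] := by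
    have : ((k : Int) + 1) = ((k + 1 : Nat) : Int) := by push_cast; ring
    rw [this, PySem.List.pyGetD_natCast]; exact List.getD_eq_getElem ds ' ' hk
  rw [g1, g2, e1, e2, pvWays, ← e2]

theorem pvStepA_good (ds : List Char) (dp : List Int) (k : Nat)
    (hk : k + 2 < ds.length) (h : pvGood ds (k + 1) dp) :
    pvGood ds k (pvStepA ds dp (k : Int)) := by
  obtain ⟨hlen, hinv⟩ := h
  have c1 : ((k : Int) + 1) = ((k + 1 : Nat) : Int) := by push_cast; ring
  have c2 : ((k : Int) + 2) = ((k + 2 : Nat) : Int) := by push_cast; ring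
  have g1 : (((k + 1 : Nat) : Int) < (ds.length : Int)) := by push_cast; omega
  have g2 : (((k + 2 : Nat) : Int) < (ds.length : Int)) := by push_cast; omega
  have hkdp : k < dp.length := by omega
  have hk1 : k + 1 < ds.length := by omega
  have wdrop := pvWays_drop ds k hk1
  rw [c1] at wdrop
  have hv1' : PySem.List.pyGetD dp ((k + 1 : Nat) : Int) 0 = pvWays (ds.drop (k + 1)) :=
    hinv (k + 1) (by omega) (by omega)
  have getdp1 : ∀ (m : Nat) (v : Int), PySem.List.pyGetD (PySem.List.pySetD dp (k : Int) v) ((m : Nat) : Int) 0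
      = if m = k then v else PySem.List.pyGetD dp (m : Int) 0 :=
    fun m v => PySem.List.pyGetD_pySetD_natCast dp k m v 0 hkdp
  have hkdp1 : ∀ v : Int, k < (PySem.List.pySetD dp (k : Int) v).length := by
    intro v; simpa [PySem.List.length_pySetD] using hkdp
  simp only [pvStepA]
  rw [c1, c2, if_pos g1]
  by_cases hC : (((k + 2 : Nat) : Int) < (ds.length : Int) ∧
      0 ≤ pvPairInt (PySem.List.pyGetD ds (k : Int) ' ') (PySem.List.pyGetD ds ((k + 1 : Nat) : Int) ' ') ∧
      pvPairInt (PySem.List.pyGetD ds (k : Int) ' ') (PySem.List.pyGetD ds ((k + 1 : Nat) : Int) ' ') ≤ 25)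
  · rw [if_pos hC]
    refine ⟨by simp [hlen], ?_⟩
    intro j hj hjn
    rw [PySem.List.pyGetD_pySetD_natCast _ k j _ 0 (hkdp1 _)]
    by_cases hjk : j = k
    · subst hjk
      rw [if_pos rfl, getdp1 j, getdp1 (j + 2), if_pos rfl, if_neg (by omega : ¬ j + 2 = j)]
      rw [hv1', hinv (j + 2) (by omega) hk, wdrop, if_pos ⟨hC.2.1, hC.2.2⟩]
    · rw [if_neg hjk, getdp1 j, if_neg hjk]
      exact hinv j (by omega) hjn
  · rw [if_neg hC]
    refine ⟨by simp [hlen], ?_⟩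
    intro j hj hjn
    rw [getdp1 j]
    by_cases hjk : j = k
    · subst hjk
      rw [if_pos rfl, hv1', wdrop, if_neg (by tauto), add_zero]
    · rw [if_neg hjk]; exact hinv j (by omega) hjn

theorem pvLoop_good (ds : List Char) (m : Nat) (dp : List Int)
    (hm : m + 3 ≤ ds.length) (h : pvGood ds (m + 1) dp) :
    pvGood ds 0 ((PySem.List.pyRange (m : Int) (-1) (-1)).foldl (pvStepA ds) dp) := by
  induction m generalizing dp with
  | zero =>
      rw [show ((0:Nat):Int) = 0 from rfl,
          PySem.List.pyRange_neg_one_cons (by omega : (-1:Int) < 0),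
          show ((0:Int) - 1) = -1 by ring, PySem.List.pyRange_neg_one_eq_nil (by omega)]
      simpa using pvStepA_good ds dp 0 (by omega) h
  | succ m ih =>
      rw [PySem.List.pyRange_neg_one_cons (by push_cast; omega : (-1:Int) < ((m+1 : Nat) : Int)),
          show (((m+1 : Nat) : Int) - 1) = (m : Int) by push_cast; ring]
      simp only [List.foldl_cons]
      exact ih (pvStepA ds dp ((m+1 : Nat) : Int)) (by omega) (pvStepA_good ds dp (m+1) (by omega) h)

theorem pvSetD_neg_two {al : Type} (xs : List al) (v : al) (h : 2 ≤ xs.length) :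
    PySem.List.pySetD xs (-2) v = xs.set (xs.length - 2) v := by
  unfold PySem.List.pySetD PySem.List.pySet? PySem.List.pyIdx?
  have a : ¬ ((0:Int) ≤ -2) := by omega
  have b : -(xs.length:Int) ≤ -2 := by omega
  simp [b]

theorem pvInit_good (ds : List Char) (h3 : 3 ≤ ds.length) :
    pvGood ds (ds.length - 2)
      (if 0 ≤ pvPairInt (PySem.List.pyGetD ds (-2) ' ') (PySem.List.pyGetD ds (-1) ' ') ∧
          pvPairInt (PySem.List.pyGetD ds (-2) ' ') (PySem.List.pyGetD ds (-1) ' ') ≤ 25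
       then PySem.List.pySetD (List.replicate ds.length 1) (-2) 2
       else List.replicate ds.length 1) := by
  have g2 : PySem.List.pyGetD ds (-2) ' ' = ds[ds.length - 2] :=
    PySem.List.pyGetD_neg_ofNat ds 2 ' ' (by omega) (by omega)
  have g1 : PySem.List.pyGetD ds (-1) ' ' = ds[ds.length - 1] :=
    PySem.List.pyGetD_neg_ofNat ds 1 ' ' (by omega) (by omega)
  have hrep : ∀ j : Nat, j < ds.length →
      PySem.List.pyGetD (List.replicate ds.length (1:Int)) (j : Int) 0 = 1 := by
    intro j hj
    rw [PySem.List.pyGetD_natCast]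
    simp [List.getD_eq_getElem?_getD, hj]
  have hlast : pvWays (ds.drop (ds.length - 1)) = 1 := by
    rw [List.drop_eq_getElem_cons (by omega : ds.length - 1 < ds.length)]
    rw [show ds.length - 1 + 1 = ds.length by omega, List.drop_length, pvWays]
  have hsnd := pvWays_drop ds (ds.length - 2) (by omega)
  rw [show ds.length - 2 + 1 = ds.length - 1 by omega] at hsnd
  have gg2 : PySem.List.pyGetD ds ((ds.length - 2 : Nat) : Int) ' ' = ds[ds.length - 2] := by
    rw [PySem.List.pyGetD_natCast]; exact List.getD_eq_getElem ds ' ' (by omega)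
  have gg1 : PySem.List.pyGetD ds (((ds.length - 2 : Nat) : Int) + 1) ' ' = ds[ds.length - 1] := by
    rw [show (((ds.length - 2 : Nat) : Int) + 1) = ((ds.length - 1 : Nat) : Int) by omega,
        PySem.List.pyGetD_natCast]
    exact List.getD_eq_getElem ds ' ' (by omega)
  rw [gg2, gg1, hlast] at hsnd
  split_ifs with hc
  · rw [g2, g1] at hc
    rw [pvSetD_neg_two _ _ (by simp; omega)]
    simp only [List.length_replicate]
    refine ⟨by simp, ?_⟩
    intro j hj hjn
    rw [PySem.List.pyGetD_natCast, List.getD_eq_getElem?_getD, List.getElem?_set]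
    by_cases hje : j = ds.length - 2
    · subst hje
      simp only [List.length_replicate]
      rw [hsnd, if_pos hc, show ds.length - 2 + 2 = ds.length by omega, List.drop_length, pvWays]
      simp [show 0 < ds.length by omega]
    · rw [if_neg (by omega)]
      simp only [List.getElem?_replicate, hjn, if_pos]
      have hj1 : j = ds.length - 1 := by omega
      subst hj1
      simp [hlast]
  · rw [g2, g1] at hc
    refine ⟨by simp, ?_⟩
    intro j hj hjn
    rw [hrep j hjn]
    by_cases hje : j = ds.length - 2
    · subst hje; rw [hsnd, if_neg hc, add_zero]
    · have hj1 : j = ds.length - 1 := by omega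
      subst hj1; rw [hlast]

theorem pv_toChars_pos (x : Int) : 0 < (PySem.Int.toChars x).length := by
  unfold PySem.Int.toChars
  split
  · simp
  · exact Nat.length_toDigits_pos

-- ===== VERDICT (by name: the statement is the Claim_ definition above) =====
theorem GetTranslationCount_DPSolution_spec : Claim_equal_GetTranslationCount_DPSolution := by
  intro number _
  unfold Spec_GetTranslationCount_DPSolution GetTranslationCount_DPSolution GetTranslationCount_DPSolution_alt
  by_cases hneg : number < 0
  · simp [hneg]
  · rw [if_neg hneg, if_neg hneg]
    have hpos : 0 < (PySem.Int.toChars number).length := pv_toChars_pos number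
    generalize (PySem.Int.toChars number) = ds at hpos ⊢
    simp only []
    by_cases h1 : ds.length = 1
    · obtain ⟨a, rfl⟩ := List.length_eq_one_iff.mp h1
      simp [pvWays]
    · rw [if_neg h1]
      by_cases h2 : ds.length = 2
      · obtain ⟨a, b, rfl⟩ := List.length_eq_two.mp h2
        rw [if_pos h2]
        have ga : PySem.List.pyGetD [a, b] (-2) ' ' = a :=
          PySem.List.pyGetD_neg_ofNat [a, b] 2 ' ' (by omega) (by simp)
        have gb : PySem.List.pyGetD [a, b] (-1) ' ' = b :=
          PySem.List.pyGetD_neg_ofNat [a, b] 1 ' ' (by omega) (by simp)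
        simp only [ga, gb] at *
        rw [show pvWays [a, b] = 1 + (if 0 ≤ pvPairInt a b ∧ pvPairInt a b ≤ 25 then 1 else 0) from by rw [pvWays]; rfl]
        split_ifs <;> omega
      · rw [if_neg h2]
        have h3 : 3 ≤ ds.length := by omega
        rw [show ((ds.length : Int) - 3) = ((ds.length - 3 : Nat) : Int) by omega]
        have hGood := pvLoop_good ds (ds.length - 3) _ (by omega)
          (by rw [show ds.length - 3 + 1 = ds.length - 2 by omega]; exact pvInit_good ds h3)
        have hfin := hGood.2 0 (by omega) (by omega)
        rw [List.drop_zero] at hfin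
        simpa using hfin
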